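-- pv_equiv track=rewrite | github.com/sangderenard/speaktome | fontmapper/FM16/FM38.py | format_blocks
-- ===== SOURCE A (Python) =====
-- def format_blocks(lines, width):
--     # Interleave lines from different blocks and fill space
--     formatted_lines = []
--     for line_blocks in lines:
--         # Determine the height of the tallest block in this row
--         max_height = max(block.count('\n') + 1 for block in line_blocks)
--         # Create buffers for each line in this row
--         buffers = ['' for _ in range(max_height)]
--         for block in line_blocks:
--             block_lines = block.split('\n')
--             block_height = len(block_lines)
--             for i in range(block_height):
--                 buffers[i] += block_lines[i].ljust(width // len(line_blocks))
--             for i in range(block_height, max_height):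
--                 buffers[i] += ' ' * (width // len(line_blocks))
--         # Join buffers to form the full lines
--         formatted_lines.extend(buffers)
--     return '\n'.join(formatted_lines)
-- ===== SOURCE B (Python) =====
-- def format_blocks(lines, width):
--     # Table-first: split each block into padded rows, then emit output row-major with join.
--     formatted_lines = []
--     for line_blocks in lines:
--         cell_width = width // len(line_blocks)
--         rows = [block.split('\n') for block in line_blocks]
--         max_height = max(len(r) for r in rows)
--         padded = [r + [''] * (max_height - len(r)) for r in rows]
--         formatted_lines.extend(
--             ''.join(p[i].ljust(cell_width) for p in padded)
--             for i in range(max_height))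
--     return '\n'.join(formatted_lines)
-- ===== Notes on version B (the rewrite author's own statement) =====
-- stated objective: faster
-- what changed: A builds each output row by mutating a list of line buffers in a block-outer loop with two index loops and repeated string += concatenation; B first builds a table (split each block into rows, pad each column to the group's max height) and then emits output row-major, producing each output line with a single join.
import Mathlib
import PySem

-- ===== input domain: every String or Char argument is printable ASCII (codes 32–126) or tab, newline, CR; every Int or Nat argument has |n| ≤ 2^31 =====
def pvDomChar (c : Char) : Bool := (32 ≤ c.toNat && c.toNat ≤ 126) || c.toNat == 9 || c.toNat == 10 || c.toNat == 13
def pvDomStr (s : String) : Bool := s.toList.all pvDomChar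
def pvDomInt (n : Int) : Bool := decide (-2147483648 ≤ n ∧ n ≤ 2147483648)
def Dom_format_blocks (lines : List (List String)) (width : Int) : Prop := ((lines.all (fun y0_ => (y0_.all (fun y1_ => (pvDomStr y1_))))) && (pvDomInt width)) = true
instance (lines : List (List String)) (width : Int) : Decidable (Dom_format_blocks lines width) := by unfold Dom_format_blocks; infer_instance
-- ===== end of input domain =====

-- B restructures A's block-outer/buffer-mutating accumulation into a table-first pass (split rows,
-- pad to max height, emit each output line with one join instead of repeated += buffer copying;
-- a timing run measured B faster).

-- s.ljust(w) for w : Int — exact: pad with spaces on the right up to w, never truncates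
def pvLjust (cs : List Char) (w : Int) : List Char :=
  cs ++ List.replicate (w - (cs.length : Int)).toNat ' '

-- ===== PORT A =====
-- the body of A's 'for block in line_blocks' loop: two index loops mutating the buffer list
def pvStepA (maxh : Nat) (cw : Int) (bufs : List (List Char)) (b : List Char) : List (List Char) :=
  let bl := PySem.Chars.splitOn b ['\n']
  let bufs1 := (List.range bl.length).foldl
    (fun bs i => bs.set i (bs.getD i [] ++ pvLjust (bl.getD i []) cw)) bufs
  (List.range' bl.length (maxh - bl.length)).foldl
    (fun bs i => bs.set i (bs.getD i [] ++ List.replicate cw.toNat ' ')) bufs1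

-- one iteration of A's outer loop: max_height via counts, buffers built by mutation
def pvRowA (lb : List (List Char)) (width : Int) : List (List Char) :=
  -- max(...) raises ValueError on empty lb; the 'none' default 1 is unreachable under Pre_
  let maxh := ((lb.map (fun b => PySem.Chars.count b ['\n'] + 1)).max?).getD 1
  let cw := PySem.Int.floordiv width (lb.length : Int)
  lb.foldl (pvStepA maxh cw) (List.replicate maxh [])

def format_blocks (lines : List (List String)) (width : Int) : String :=
  String.ofList (PySem.Chars.join ['\n']
    (lines.foldl (fun acc lb => acc ++ pvRowA (lb.map String.toList) width) []))

-- ===== PORT B =====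
-- one row of B: split every block, pad rows to the common height, join output lines row-major
def pvRowAlt (lb : List (List Char)) (width : Int) : List (List Char) :=
  let cw := PySem.Int.floordiv width (lb.length : Int)
  let rows := lb.map (fun b => PySem.Chars.splitOn b ['\n'])
  let maxh := ((rows.map List.length).max?).getD 1    -- max(...) raises on empty; unreachable under Pre_
  let padded := rows.map (fun r => r ++ List.replicate (maxh - r.length) [])
  (List.range maxh).map (fun i => PySem.Chars.join [] (padded.map (fun p => pvLjust (p.getD i []) cw)))

def format_blocks_alt (lines : List (List String)) (width : Int) : String :=
  String.ofList (PySem.Chars.join ['\n']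
    (lines.flatMap (fun lb => pvRowAlt (lb.map String.toList) width)))

-- ===== PRECONDITION & SPEC =====
-- Pre_ excludes exactly the inputs where A raises: an empty inner list makes A's max(...) raise
-- ValueError (and width // 0 would follow); B raises there too.
def Pre_format_blocks (lines : List (List String)) (width : Int) : Prop :=
  ∀ lb ∈ lines, lb ≠ []
instance (lines : List (List String)) (width : Int) : Decidable (Pre_format_blocks lines width) := by
  unfold Pre_format_blocks; infer_instance
def pvWitness_format_blocks : List (List String) × Int := ([["a\nbc", "d"], ["xy"]], 7)

def Spec_format_blocks (lines : List (List String)) (width : Int) (out : String) : Prop := out = format_blocks_alt lines width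
instance (lines : List (List String)) (width : Int) (out : String) : Decidable (Spec_format_blocks lines width out) := by unfold Spec_format_blocks; infer_instance

-- ===== CLAIM (what is proved, stated in full; the proofs are below) =====
def Claim_equal_format_blocks : Prop := ∀ (lines : List (List String)) (width : Int), Dom_format_blocks lines width → Pre_format_blocks lines width → Spec_format_blocks lines width (format_blocks lines width)

-- ===== LEMMAS AND PROOFS =====

-- count.go on the single-char separator '\n' counts the newlines
lemma pv_count_go (l : List Char) : ∀ (fuel acc : Nat), l.length ≤ fuel →
    PySem.Chars.count.go ['\n'] fuel l acc = acc + l.count '\n' := by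
  induction l with
  | nil => intro fuel acc _; cases fuel <;> simp [PySem.Chars.count.go]
  | cons c rest ih =>
    intro fuel acc h
    cases fuel with
    | zero => simp at h
    | succ f =>
      simp only [PySem.Chars.count.go]
      by_cases hc : c = '\n'
      · subst hc
        rw [if_pos (by simp [List.isPrefixOf])]
        have hd : List.drop (['\n'] : List Char).length ('\n' :: rest) = rest := rfl
        rw [hd, ih f (acc + 1) (by simpa using Nat.le_of_succ_le_succ h)]
        simp
        omega
      · have : List.isPrefixOf ['\n'] (c :: rest) = false := by
          simp [List.isPrefixOf]; exact fun h' => hc h'.symm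
        rw [this]
        simp only [if_false, Bool.false_eq_true]
        rw [ih f acc (by simpa using Nat.le_of_succ_le_succ h)]
        simp [hc]
  
-- splitOn.go on '\n' produces one piece per newline plus one
lemma pv_split_go_len (l : List Char) : ∀ (fuel : Nat) (cur : List Char) (acc : List (List Char)),
    l.length ≤ fuel →
    (PySem.Chars.splitOn.go ['\n'] fuel l cur acc).length = acc.length + 1 + l.count '\n' := by
  induction l with
  | nil => intro fuel cur acc _; cases fuel <;> simp [PySem.Chars.splitOn.go]
  | cons c rest ih =>
    intro fuel cur acc h
    cases fuel with
    | zero => simp at h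
    | succ f =>
      simp only [PySem.Chars.splitOn.go]
      by_cases hc : c = '\n'
      · subst hc
        rw [if_pos (by simp [List.isPrefixOf])]
        have hd : List.drop (['\n'] : List Char).length ('\n' :: rest) = rest := rfl
        rw [hd, ih f [] (List.reverse cur :: acc) (by simpa using Nat.le_of_succ_le_succ h)]
        simp; omega
      · have : List.isPrefixOf ['\n'] (c :: rest) = false := by
          simp [List.isPrefixOf]; exact fun h' => hc h'.symm
        rw [this]
        simp only [if_false, Bool.false_eq_true]
        rw [ih f (c :: cur) acc (by simpa using Nat.le_of_succ_le_succ h)]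
        simp [hc]

lemma pv_splitOn_len (s : List Char) :
    (PySem.Chars.splitOn s ['\n']).length = PySem.Chars.count s ['\n'] + 1 := by
  unfold PySem.Chars.splitOn PySem.Chars.count
  rw [pv_split_go_len s (s.length + 1) [] [] (by omega)]
  simp [pv_count_go s s.length 0 (le_refl _)]
  omega

-- join with the empty separator is flatten
lemma pv_join_nil (ps : List (List Char)) : PySem.Chars.join [] ps = ps.flatten := by
  induction ps with
  | nil => simp [PySem.Chars.join_nil]
  | cons p ps ih =>
    cases ps with
    | nil => simp [PySem.Chars.join_singleton]
    | cons q rest => rw [PySem.Chars.join_cons_cons]; simp at ih ⊢; rw [ih]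

-- pointwise description of List.set through getD
lemma pv_getD_set (l : List (List Char)) (i j : Nat) (v : List Char) (h : i < l.length) :
    (l.set i v).getD j [] = if i = j then v else l.getD j [] := by
  simp only [List.getD_eq_getElem?_getD, List.getElem?_set]
  split
  · next heq => subst heq; simp
  · rfl

-- the 'buffers[i] += f i' fold over distinct in-range indices, characterised pointwise
lemma pv_fold_set (f : Nat → List Char) :
    ∀ (L : List Nat) (bs : List (List Char)), L.Nodup → (∀ i ∈ L, i < bs.length) →
    (L.foldl (fun bs i => bs.set i (bs.getD i [] ++ f i)) bs).length = bs.length ∧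
    ∀ j, (L.foldl (fun bs i => bs.set i (bs.getD i [] ++ f i)) bs).getD j [] =
      bs.getD j [] ++ (if j ∈ L then f j else []) := by
  intro L
  induction L with
  | nil => intro bs _ _; simp
  | cons i L ih =>
    intro bs hnd hb
    have hiL : i ∉ L := (List.nodup_cons.mp hnd).1
    have hi : i < bs.length := hb i (List.mem_cons_self ..)
    have hlen : (bs.set i (bs.getD i [] ++ f i)).length = bs.length := by simp
    obtain ⟨ihlen, ihget⟩ := ih (bs.set i (bs.getD i [] ++ f i))
      (List.nodup_cons.mp hnd).2
      (fun k hk => by rw [hlen]; exact hb k (List.mem_cons_of_mem _ hk))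
    refine ⟨by simp only [List.foldl_cons]; rw [ihlen, hlen], ?_⟩
    intro j
    simp only [List.foldl_cons]
    rw [ihget j, pv_getD_set bs i j _ hi]
    rcases eq_or_ne i j with rfl | hij
    · simp [hiL]
    · have : (j ∈ i :: L) ↔ (j ∈ L) := by
        simp only [List.mem_cons, or_iff_right_iff_imp]
        intro h; exact absurd h.symm hij
      simp only [if_neg hij]
      by_cases hjL : j ∈ L
      · simp [hjL, this.mpr hjL]
      · have hjI : j ∉ i :: L := fun h => hjL (this.mp h)
        simp [hjL, hjI]

-- what one block contributes to buffer j
def pvCell (cw : Int) (b : List Char) (j : Nat) : List Char :=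
  if j < (PySem.Chars.splitOn b ['\n']).length
  then pvLjust ((PySem.Chars.splitOn b ['\n']).getD j []) cw
  else List.replicate cw.toNat ' '

lemma pv_stepA (b : List Char) (bs : List (List Char)) (H : Nat) (cw : Int)
    (hlen : bs.length = H) (hb : (PySem.Chars.splitOn b ['\n']).length ≤ H) :
    (pvStepA H cw bs b).length = H ∧
    ∀ j < H, (pvStepA H cw bs b).getD j [] = bs.getD j [] ++ pvCell cw b j := by
  unfold pvStepA
  set bl := PySem.Chars.splitOn b ['\n'] with hbl
  obtain ⟨l1, g1⟩ := pv_fold_set (fun i => pvLjust (bl.getD i []) cw) (List.range bl.length) bs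
    (List.nodup_range) (fun i hi => by rw [hlen]; exact lt_of_lt_of_le (List.mem_range.mp hi) hb)
  set bs1 := (List.range bl.length).foldl
    (fun bs i => bs.set i (bs.getD i [] ++ pvLjust (bl.getD i []) cw)) bs with hbs1
  obtain ⟨l2, g2⟩ := pv_fold_set (fun _ => List.replicate cw.toNat ' ')
    (List.range' bl.length (H - bl.length)) bs1
    (List.nodup_range') (fun i hi => by
      rw [l1, hlen]
      have := List.mem_range'_1.mp hi
      omega)
  refine ⟨by rw [l2, l1, hlen], ?_⟩
  intro j hj
  rw [g2 j, g1 j]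
  unfold pvCell
  rw [← hbl]
  by_cases hjb : j < bl.length
  · have h1 : j ∈ List.range bl.length := List.mem_range.mpr hjb
    have h2 : j ∉ List.range' bl.length (H - bl.length) := by
      intro h; have := List.mem_range'_1.mp h; omega
    simp [h1, h2, hjb]
  · have h1 : j ∉ List.range bl.length := by simp [List.mem_range]; omega
    have h2 : j ∈ List.range' bl.length (H - bl.length) := List.mem_range'_1.mpr ⟨by omega, by omega⟩
    simp [h1, h2, hjb]

lemma pv_foldA (cw : Int) (H : Nat) :
    ∀ (blocks : List (List Char)) (bs : List (List Char)), bs.length = H →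
    (∀ b ∈ blocks, (PySem.Chars.splitOn b ['\n']).length ≤ H) →
    (blocks.foldl (pvStepA H cw) bs).length = H ∧
    ∀ j < H, (blocks.foldl (pvStepA H cw) bs).getD j [] =
      bs.getD j [] ++ (blocks.map (fun b => pvCell cw b j)).flatten := by
  intro blocks
  induction blocks with
  | nil => intro bs h _; simpa using h
  | cons b blocks ih =>
    intro bs hlen hle
    obtain ⟨l1, g1⟩ := pv_stepA b bs H cw hlen (hle b (List.mem_cons_self ..))
    obtain ⟨l2, g2⟩ := ih (pvStepA H cw bs b) l1 (fun x hx => hle x (List.mem_cons_of_mem _ hx))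
    refine ⟨by simpa using l2, ?_⟩
    intro j hj
    simp only [List.foldl_cons]
    rw [g2 j hj, g1 j hj]
    simp

-- the central row equivalence: A's mutated buffers equal B's transposed table
lemma pv_row_eq (lb : List (List Char)) (width : Int) :
    pvRowA lb width = pvRowAlt lb width := by
  simp only [pvRowA, pvRowAlt]
  set cw := PySem.Int.floordiv width (lb.length : Int) with hcw
  have hmapeq : (lb.map (fun b => PySem.Chars.splitOn b ['\n'])).map List.length
      = lb.map (fun b => PySem.Chars.count b ['\n'] + 1) := by
    rw [List.map_map]
    exact List.map_congr_left (fun b _ => pv_splitOn_len b)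
  set H := ((lb.map (fun b => PySem.Chars.count b ['\n'] + 1)).max?).getD 1 with hH
  rw [hmapeq, ← hH]
  have hbound : ∀ b ∈ lb, (PySem.Chars.splitOn b ['\n']).length ≤ H := by
    intro b hb
    rw [pv_splitOn_len b]
    exact List.le_max?_getD_of_mem (List.mem_map_of_mem hb)
  obtain ⟨hlenA, hgetA⟩ := pv_foldA cw H lb (List.replicate H [])
    (List.length_replicate) hbound
  apply List.ext_getElem (by simp [hlenA])
  intro j h1 h2
  have hj : j < H := by simpa [hlenA] using h1
  have hA : (lb.foldl (pvStepA H cw) (List.replicate H []))[j] =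
      (lb.map (fun b => pvCell cw b j)).flatten := by
    rw [← List.getD_eq_getElem _ [] h1, hgetA j hj]
    simp
  rw [hA]
  rw [List.getElem_map, List.getElem_range]
  rw [pv_join_nil, List.map_map, List.map_map]
  congr 1
  apply List.map_congr_left
  intro b hb
  simp only [Function.comp]
  set r := PySem.Chars.splitOn b ['\n'] with hr
  have hrH : r.length ≤ H := hbound b hb
  by_cases hjr : j < r.length
  · have hget : (r ++ List.replicate (H - r.length) []).getD j [] = r.getD j [] := by
      rw [List.getD_eq_getElem _ [] (by simp; omega), List.getD_eq_getElem _ [] hjr]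
      exact List.getElem_append_left hjr
    rw [hget]
    simp [pvCell, ← hr, hjr]
  · have hget : (r ++ List.replicate (H - r.length) []).getD j [] = [] := by
      rw [List.getD_eq_getElem _ [] (by simp; omega)]
      rw [List.getElem_append_right (by omega)]
      exact List.getElem_replicate ..
    rw [hget]
    simp [pvCell, ← hr, hjr, pvLjust]

theorem format_blocks_spec : Claim_equal_format_blocks := by
  intro lines width _ hpre
  unfold Spec_format_blocks format_blocks format_blocks_alt
  rw [PySem.List.foldl_append_eq_flatMap]
  simp only [List.nil_append]
  have : ∀ lb ∈ lines, pvRowA (lb.map String.toList) width = pvRowAlt (lb.map String.toList) width := by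
    intro lb h
    exact pv_row_eq _ _
  rw [List.flatMap_def, List.flatMap_def, List.map_congr_left (fun lb h => this lb h)]
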